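-- pv_equiv track=rewrite | github.com/Curiey/2020-Elbit_Challenge | Stage 1/stage_1.py | function_one
-- ===== SOURCE A (Python) =====
-- def function_one(text, unknown_base_number_location, number_base, constant):
--     """
--     This function get a text, location, base for the location and constant number.
--     and return the text at the current location base on the given base after multiple
--     by the given constant.
-- `
--     :param text: String. for get the characters by there location.
--     :param unknown_base_number_location: List. list of string representing the location in the given base.
--     :param number_base: Int. base of the locations.
--     :param constant: Int. number to multiple by each of the location.
--
--     :return: Tuple. (message: String, base: String, Constant: String), if location
--     is out of bound, message will be empty.
--     """
--     locations = []
--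
--     for unknown_base_number in unknown_base_number_location:
--         location = 0
--         for index, char in enumerate(unknown_base_number[::-1]):
--             try:
--                 number = int(char)
--             except ValueError:
--                 char = char.lower()
--                 number = ord(char) - 96 + 9
--             location = location + number * pow(number_base, index)
--         locations.append(location * constant)
--
--     message = ""
--     for index, location in enumerate(locations):
--         if location < 0:
--             message += '/'
--         elif location < len(text):
--             message += text[location]
--         else:
--             message = ""
--             break
--
--     return message, f'base:{number_base}', f'constant:{constant}'
-- ===== SOURCE B (Python) =====
-- def _digit(char):
--     try:
--         return int(char)
--     except ValueError:
--         return ord(char.lower()) - 96 + 9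
--
--
-- def function_one(text, unknown_base_number_location, number_base, constant):
--     locations = [_horner(s, number_base) * constant for s in unknown_base_number_location]
--     if any(location >= len(text) for location in locations):
--         message = ""
--     else:
--         message = "".join('/' if location < 0 else text[location] for location in locations)
--     return message, 'base:%d' % number_base, 'constant:%d' % constant
--
--
-- def _horner(digits, number_base):
--     value = 0
--     for char in digits:
--         value = value * number_base + _digit(char)
--     return value
-- ===== Notes on version B (the rewrite author's own statement) =====
-- stated objective: simpler
-- what changed: Per-string parsing becomes a left-to-right Horner recurrence (value = value*base + digit) instead of reversing the string and summing digit*pow(base, index), and the breaking message loop becomes an any() bounds check plus a join; the verbatim digit mapping (int(char), fallback ord(lower)-96+9) is kept.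
import Mathlib
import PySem

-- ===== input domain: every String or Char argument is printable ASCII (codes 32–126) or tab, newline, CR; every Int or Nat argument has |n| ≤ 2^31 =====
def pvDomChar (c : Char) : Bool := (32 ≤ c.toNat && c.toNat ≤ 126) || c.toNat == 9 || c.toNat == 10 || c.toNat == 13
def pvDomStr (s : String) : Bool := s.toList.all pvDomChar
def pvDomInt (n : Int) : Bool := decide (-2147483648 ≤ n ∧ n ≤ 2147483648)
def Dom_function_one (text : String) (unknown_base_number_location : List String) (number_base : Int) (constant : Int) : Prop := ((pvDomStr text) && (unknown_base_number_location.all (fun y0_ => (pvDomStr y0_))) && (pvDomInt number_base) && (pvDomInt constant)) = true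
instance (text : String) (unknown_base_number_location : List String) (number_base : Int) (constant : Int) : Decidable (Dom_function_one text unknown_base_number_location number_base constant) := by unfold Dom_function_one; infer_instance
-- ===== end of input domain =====

-- B replaces A's reversed-enumerate positional-power sum by a left-to-right Horner
-- recurrence and A's breaking message loop by an any-check plus a join (objective:
-- simpler; same asymptotic cost).

-- shared digit extraction: try int(char) except ValueError: ord(char.lower()) - 96 + 9
-- (A writes it inline, B's Python has it as the helper _digit; the computation is identical)
def pvDigit (c : Char) : Int :=
  match PySem.Int.ofChars? [c] with    -- int(char); none = ValueError
  | some n => n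
  | none => ((PySem.Chars.lowerChar c).toNat : Int) - 96 + 9

-- ===== PORT A =====
-- A's message loop with its break, transliterated as recursion over the locations
-- (the enumerate index of that loop is unused in A's body); text[location] is reached
-- only under 0 ≤ location < len(text), where pyGet? is some
def pvMsgA (tl : List Char) : List Char → List Int → List Char
  | acc, [] => acc
  | acc, loc :: rest =>
    if loc < 0 then pvMsgA tl (acc ++ ['/']) rest
    else if loc < (tl.length : Int) then
      pvMsgA tl (acc ++ (PySem.List.pyGet? tl loc).toList) rest
    else []

def function_one (text : String) (unknown_base_number_location : List String) (number_base : Int) (constant : Int) : String × String × String :=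
  let locations := unknown_base_number_location.foldl (fun locs s =>
    -- s[::-1] is reverse (PySem.List.slice?_none_none_neg_one)
    let location := (PySem.List.enumerate s.toList.reverse 0).foldl
      (fun loc p => loc + pvDigit p.2 * number_base ^ p.1.toNat) 0
    locs ++ [location * constant]) []
  let message := pvMsgA text.toList [] locations
  (String.ofList message, "base:" ++ PySem.Int.toStr number_base, "constant:" ++ PySem.Int.toStr constant)

-- ===== PORT B =====
def pvHorner (digits : List Char) (number_base : Int) : Int :=
  digits.foldl (fun value c => value * number_base + pvDigit c) 0

def function_one_alt (text : String) (unknown_base_number_location : List String) (number_base : Int) (constant : Int) : String × String × String :=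
  let tl := text.toList
  let locations := unknown_base_number_location.map (fun s => pvHorner s.toList number_base * constant)
  let message :=
    if locations.any (fun location => (tl.length : Int) ≤ location) then []
    else (locations.map (fun location =>
      if location < 0 then ['/'] else (PySem.List.pyGet? tl location).toList)).flatten
  (String.ofList message, "base:" ++ PySem.Int.toStr number_base, "constant:" ++ PySem.Int.toStr constant)

-- ===== PRECONDITION & SPEC =====
def Spec_function_one (text : String) (unknown_base_number_location : List String) (number_base : Int) (constant : Int) (out : String × String × String) : Prop := out = function_one_alt text unknown_base_number_location number_base constant
instance (text : String) (unknown_base_number_location : List String) (number_base : Int) (constant : Int) (out : String × String × String) : Decidable (Spec_function_one text unknown_base_number_location number_base constant out) := by unfold Spec_function_one; infer_instance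

-- ===== CLAIM (what is proved, stated in full; the proofs are below) =====
def Claim_equal_function_one : Prop := ∀ (text : String) (unknown_base_number_location : List String) (number_base : Int) (constant : Int), Dom_function_one text unknown_base_number_location number_base constant → Spec_function_one text unknown_base_number_location number_base constant (function_one text unknown_base_number_location number_base constant)

-- ===== LEMMAS AND PROOFS =====

-- positional sum of r read at offset k: S (c::t) k = digit c · b^k + S t (k+1)
def pvPosSum (b : Int) : List Char → Nat → Int
  | [], _ => 0
  | c :: t, k => pvDigit c * b ^ k + pvPosSum b t (k + 1)

lemma pvEnumFold (b : Int) (r : List Char) : ∀ (k : Nat) (acc : Int),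
    (PySem.List.enumerate r (k : Int)).foldl
      (fun loc p => loc + pvDigit p.2 * b ^ p.1.toNat) acc
      = acc + pvPosSum b r k := by
  induction r with
  | nil => intro k acc; simp [PySem.List.enumerate_nil, pvPosSum]
  | cons c t ih =>
    intro k acc
    rw [PySem.List.enumerate_cons]
    have : ((k : Int) + 1) = ((k + 1 : Nat) : Int) := by push_cast; ring
    simp only [List.foldl_cons, this, ih, pvPosSum, Int.toNat_natCast]
    ring

lemma pvPosSum_append (b : Int) (c : Char) : ∀ (xs : List Char) (k : Nat),
    pvPosSum b (xs ++ [c]) k = pvPosSum b xs k + pvDigit c * b ^ (k + xs.length) := by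
  intro xs
  induction xs with
  | nil => intro k; simp [pvPosSum]
  | cons x t ih =>
    intro k
    simp only [List.cons_append, pvPosSum, ih, List.length_cons]
    ring_nf

lemma pvHorner_shift (b : Int) : ∀ (l : List Char) (acc : Int),
    l.foldl (fun v c => v * b + pvDigit c) acc
      = acc * b ^ l.length + l.foldl (fun v c => v * b + pvDigit c) 0 := by
  intro l
  induction l with
  | nil => intro acc; simp
  | cons c t ih =>
    intro acc
    simp only [List.foldl_cons, List.length_cons]
    rw [ih (acc * b + pvDigit c), ih (0 * b + pvDigit c)]
    ring

lemma pvPosSum_reverse (b : Int) (l : List Char) :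
    pvPosSum b l.reverse 0 = pvHorner l b := by
  induction l with
  | nil => simp [pvPosSum, pvHorner]
  | cons c t ih =>
    rw [List.reverse_cons, pvPosSum_append, ih, List.length_reverse, Nat.zero_add]
    unfold pvHorner
    rw [List.foldl_cons, pvHorner_shift b t (0 * b + pvDigit c)]
    ring

lemma pvMsg_eq (tl : List Char) : ∀ (ls : List Int) (acc : List Char),
    pvMsgA tl acc ls =
      if ls.any (fun location => decide ((tl.length : Int) ≤ location)) then []
      else acc ++ (ls.map (fun location =>
        if location < 0 then ['/'] else (PySem.List.pyGet? tl location).toList)).flatten := by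
  intro ls
  induction ls with
  | nil => intro acc; simp [pvMsgA]
  | cons loc rest ih =>
    intro acc
    simp only [pvMsgA, List.any_cons, List.map_cons, List.flatten_cons]
    by_cases h0 : loc < 0
    · rw [if_pos h0, ih]
      have : ¬ ((tl.length : Int) ≤ loc) := by omega
      simp [h0, this]
    · rw [if_neg h0]
      by_cases h1 : loc < (tl.length : Int)
      · rw [if_pos h1, ih]
        have : ¬ ((tl.length : Int) ≤ loc) := by omega
        simp [h0, this]
      · rw [if_neg h1]
        have : (tl.length : Int) ≤ loc := by omega
        simp [this]

-- ===== VERDICT (by name: the statement is the Claim_ definition above) =====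
theorem function_one_spec : Claim_equal_function_one := by
  intro text ubl b k _
  unfold Spec_function_one function_one function_one_alt
  have hloc : ubl.foldl (fun locs s =>
        locs ++ [((PySem.List.enumerate s.toList.reverse 0).foldl
          (fun loc p => loc + pvDigit p.2 * b ^ p.1.toNat) 0) * k]) []
      = ubl.map (fun s => pvHorner s.toList b * k) := by
    rw [PySem.List.foldl_append_singleton_eq_map]
    refine List.map_congr_left (fun s _ => ?_)
    have h0 : (0 : Int) = ((0 : Nat) : Int) := rfl
    rw [h0, pvEnumFold, pvPosSum_reverse]
    ring_nf
  simp only [hloc, pvMsg_eq, List.nil_append]
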